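-- pv_equiv track=rewrite | github.com/Kaligo812/IP | guias/guia7/guia7.py | subsecuencias_ordenadas
-- ===== SOURCE A (Python) =====
-- def subsecuencias_ordenadas(s: list[int]) -> list[int]:
--     if (len(s) == 0):
--         return [0]
--
--     cant_nums_ordenados: int = 1 # asumo que s no esta vacia
--     i: int = 1
--
--     while (i < len(s)):
--         if (s[i - 1] <= s[i]):
--             cant_nums_ordenados += 1
--         else:
--             break
--
--         i += 1
--
--     return [cant_nums_ordenados] + subsecuencias_ordenadas(s[i:])
-- ===== SOURCE B (Python) =====
-- def subsecuencias_ordenadas(s: list[int]) -> list[int]: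
--     res = []
--     run = 0
--     prev = 0
--     for x in s:
--         if run and prev <= x:
--             run += 1
--         else:
--             if run:
--                 res.append(run)
--             run = 1
--         prev = x
--     if run:
--         res.append(run)
--     res.append(0)
--     return res
-- ===== Notes on version B (the rewrite author's own statement) =====
-- stated objective: faster
-- what changed: replaces A's recursion-with-slicing (each maximal run found by an index loop, then a sliced copy of the rest recursed on) by one iterative linear pass accumulating run lengths, with the final 0 appended once
import Mathlib
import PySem

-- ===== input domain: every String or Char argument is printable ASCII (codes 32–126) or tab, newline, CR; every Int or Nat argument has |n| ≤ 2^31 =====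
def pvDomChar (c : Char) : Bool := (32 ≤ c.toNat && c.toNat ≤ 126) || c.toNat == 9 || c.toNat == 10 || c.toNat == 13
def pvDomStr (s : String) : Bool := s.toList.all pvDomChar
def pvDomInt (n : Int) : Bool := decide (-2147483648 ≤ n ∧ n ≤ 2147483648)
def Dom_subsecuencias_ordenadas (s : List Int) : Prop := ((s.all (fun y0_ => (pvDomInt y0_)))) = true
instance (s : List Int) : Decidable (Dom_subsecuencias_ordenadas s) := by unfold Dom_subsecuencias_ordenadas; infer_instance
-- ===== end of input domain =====

-- B replaces A's quadratic recursion-with-slicing by one linear pass accumulating run lengths (return value only; neither mutates its argument).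

-- ===== PORT A =====
-- the while loop of A: state (cant, i); fuel = len(s) bounds the iteration count (i starts at 1
-- and increases every iteration), so the loop is exact; indices stay in range, so getD is exact
def pvAloop (s : List Int) : Nat → Int → Nat → Int × Nat
  | 0, cant, i => (cant, i)
  | fuel + 1, cant, i =>
    if i < s.length then
      if s.getD (i - 1) 0 ≤ s.getD i 0 then pvAloop s fuel (cant + 1) (i + 1)
      else (cant, i)
    else (cant, i)

-- A's recursion on the slice s[i:]; fuel = len(s) bounds the recursion depth (each call drops ≥ 1 element)
def pvArec : Nat → List Int → List Int
  | 0, _ => [0]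
  | fuel + 1, s =>
    if s.length = 0 then [0]
    else [(pvAloop s s.length 1 1).1] ++ pvArec fuel (s.drop (pvAloop s s.length 1 1).2)

def subsecuencias_ordenadas (s : List Int) : List Int := pvArec s.length s

-- ===== PORT B =====
def pvBstep (st : List Int × Int × Int) (x : Int) : List Int × Int × Int :=
  if st.2.1 ≠ 0 ∧ st.2.2 ≤ x then (st.1, st.2.1 + 1, x)
  else ((if st.2.1 ≠ 0 then st.1 ++ [st.2.1] else st.1), 1, x)

def subsecuencias_ordenadas_alt (s : List Int) : List Int :=
  let st := s.foldl pvBstep ([], 0, 0)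
  (if st.2.1 ≠ 0 then st.1 ++ [st.2.1] else st.1) ++ [0]

-- ===== PRECONDITION & SPEC =====
def Spec_subsecuencias_ordenadas (s : List Int) (out : List Int) : Prop := out = subsecuencias_ordenadas_alt s
instance (s : List Int) (out : List Int) : Decidable (Spec_subsecuencias_ordenadas s out) := by unfold Spec_subsecuencias_ordenadas; infer_instance

-- ===== CLAIM (what is proved, stated in full; the proofs are below) =====
def Claim_equal_subsecuencias_ordenadas : Prop := ∀ (s : List Int), Dom_subsecuencias_ordenadas s → Spec_subsecuencias_ordenadas s (subsecuencias_ordenadas s)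

-- ===== LEMMAS AND PROOFS =====

-- common characterisation: split off the longest non-decreasing continuation of prev
def pvSplit1 : List Int → Int → Nat × List Int
  | [], _ => (0, [])
  | x :: xs, p => if p ≤ x then ((pvSplit1 xs x).1 + 1, (pvSplit1 xs x).2) else (0, x :: xs)

theorem pvSplit1_snd_eq_drop (l : List Int) (p : Int) : (pvSplit1 l p).2 = l.drop (pvSplit1 l p).1 := by
  induction l generalizing p with
  | nil => simp [pvSplit1]
  | cons x xs ih =>
    simp only [pvSplit1]
    split
    · simpa using ih x
    · simp

theorem pvSplit1_snd_len (l : List Int) (p : Int) : (pvSplit1 l p).2.length ≤ l.length := by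
  rw [pvSplit1_snd_eq_drop]; simp

def pvRuns : List Int → List Int
  | [] => [0]
  | x :: xs => (((pvSplit1 xs x).1 : Int) + 1) :: pvRuns (pvSplit1 xs x).2
termination_by l => l.length
decreasing_by
  have := pvSplit1_snd_len xs x
  simp only [List.length_cons]
  omega

theorem pvAloop_spec (s : List Int) (fuel : Nat) (cant : Int) (i : Nat)
    (hf : s.length ≤ i + fuel) :
    pvAloop s fuel cant i =
      (cant + ((pvSplit1 (s.drop i) (s.getD (i - 1) 0)).1 : Int),
       i + (pvSplit1 (s.drop i) (s.getD (i - 1) 0)).1) := by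
  induction fuel generalizing cant i with
  | zero =>
    have : s.drop i = [] := List.drop_eq_nil_of_le (by omega)
    simp [pvAloop, this, pvSplit1]
  | succ fuel ih =>
    simp only [pvAloop]
    by_cases h : i < s.length
    · rw [if_pos h]
      have hd : s.drop i = s.getD i 0 :: s.drop (i + 1) := by
        rw [List.getD_eq_getElem s 0 h, List.drop_eq_getElem_cons h]
      rw [hd]
      by_cases hle : s.getD (i - 1) 0 ≤ s.getD i 0
      · rw [if_pos hle]
        simp only [pvSplit1, if_pos hle]
        have ih' := ih (cant + 1) (i + 1) (by omega)
        have he : (i + 1) - 1 = i := by omega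
        rw [he] at ih'
        rw [ih']
        simp only [Prod.mk.injEq]
        refine ⟨by push_cast; ring, by omega⟩
      · rw [if_neg hle]
        simp only [pvSplit1, if_neg hle]
        simp
    · rw [if_neg h]
      have : s.drop i = [] := List.drop_eq_nil_of_le (by omega)
      simp [this, pvSplit1]

theorem pvArec_eq_runs (fuel : Nat) (s : List Int) (hf : s.length ≤ fuel) :
    pvArec fuel s = pvRuns s := by
  induction fuel generalizing s with
  | zero =>
    have : s = [] := by
      cases s with
      | nil => rfl
      | cons x xs => simp at hf
    simp [this, pvArec, pvRuns]
  | succ fuel ih =>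
    simp only [pvArec]
    by_cases h : s.length = 0
    · have : s = [] := List.length_eq_zero_iff.mp h
      simp [this, pvRuns]
    · rw [if_neg h]
      obtain ⟨x, xs, rfl⟩ := List.exists_cons_of_ne_nil
        (show s ≠ [] by intro hc; subst hc; simp at h)
      have hsp := pvAloop_spec (x :: xs) (x :: xs).length 1 1 (by omega)
      simp only [show (1 : Nat) - 1 = 0 from rfl, List.drop_one, List.tail_cons,
        List.getD_cons_zero] at hsp
      rw [hsp]
      simp only [pvRuns]
      have hdrop : (x :: xs).drop (1 + (pvSplit1 xs x).1) = (pvSplit1 xs x).2 := by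
        rw [pvSplit1_snd_eq_drop, show 1 + (pvSplit1 xs x).1 = (pvSplit1 xs x).1 + 1 from by omega]
        simp [List.drop_succ_cons]
      rw [hdrop]
      have hlen : (pvSplit1 xs x).2.length ≤ fuel := by
        have := pvSplit1_snd_len xs x
        simp only [List.length_cons] at hf h
        omega
      rw [ih _ hlen]
      simp only [List.singleton_append]
      rw [add_comm (1 : Int)]

theorem pvA_eq_runs (s : List Int) : subsecuencias_ordenadas s = pvRuns s :=
  pvArec_eq_runs s.length s (le_refl _)

def pvFinish (st : List Int × Int × Int) : List Int :=
  (if st.2.1 ≠ 0 then st.1 ++ [st.2.1] else st.1) ++ [0]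

theorem pvBfold (l : List Int) (res : List Int) (run : Int) (p : Int) (h : 1 ≤ run) :
    pvFinish (l.foldl pvBstep (res, run, p)) =
      res ++ (run + ((pvSplit1 l p).1 : Int)) :: pvRuns (pvSplit1 l p).2 := by
  induction l generalizing res run p with
  | nil =>
    simp only [List.foldl_nil, pvFinish, pvSplit1, pvRuns, if_pos (show run ≠ 0 by omega)]
    simp
  | cons x xs ih =>
    simp only [List.foldl_cons, pvBstep]
    by_cases hle : p ≤ x
    · rw [if_pos ⟨by omega, hle⟩]
      rw [ih res (run + 1) x (by omega)]
      simp only [pvSplit1, if_pos hle]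
      congr 2
      push_cast
      ring
    · rw [if_neg (by simp [hle]), if_pos (by omega : run ≠ 0)]
      rw [ih (res ++ [run]) 1 x (le_refl 1)]
      simp only [pvSplit1, if_neg hle, pvRuns]
      simp only [List.append_assoc, List.singleton_append]
      congr 3
      · omega
      · ring

theorem pvB_eq_runs (s : List Int) : subsecuencias_ordenadas_alt s = pvRuns s := by
  cases s with
  | nil => simp [subsecuencias_ordenadas_alt, pvRuns]
  | cons x xs =>
    show pvFinish ((x :: xs).foldl pvBstep ([], 0, 0)) = _
    simp only [List.foldl_cons, pvBstep]
    rw [if_neg (by simp), if_neg (by simp)]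
    rw [pvBfold xs [] 1 x (le_refl 1)]
    simp only [pvRuns, List.nil_append]
    rw [add_comm (1 : Int)]

-- ===== VERDICT (by name: the statement is the Claim_ definition above) =====
theorem subsecuencias_ordenadas_spec : Claim_equal_subsecuencias_ordenadas := by
  intro s _
  unfold Spec_subsecuencias_ordenadas
  rw [pvA_eq_runs, pvB_eq_runs]
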